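-- pv_equiv track=rewrite | github.com/benblack769/psm_interp | old/functionalGAS/helper.py | SplitStrList
-- ===== SOURCE A (Python) =====
-- def SplitStrList(slist,char):
--     NewL = []
--     for s in slist:
--         thisstr = s
--         for n in range(s.count(char)):
--             if(not thisstr):
--                 break
--             strs = thisstr.partition(char)
--             if(strs[0]):
--                 NewL.append(strs[0])
--             if(strs[1]):
--                 NewL.append(strs[1])
--
--             thisstr = strs[2]
--         if(thisstr):
--             NewL.append(thisstr)
--     return NewL
-- ===== SOURCE B (Python) =====
-- def SplitStrList(slist, char):
--     out = []
--     for s in slist: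
--         first = True
--         for p in s.split(char):
--             if not first:
--                 out.append(char)
--             if p:
--                 out.append(p)
--             first = False
--     return out
-- ===== Notes on version B (the rewrite author's own statement) =====
-- stated objective: alternative
-- what changed: replaces the count/partition loop (which re-scans and copies the remaining suffix on every iteration) by one str.split per string followed by a single interleaving pass over the pieces; intended as faster but measured only ~1.25x at the largest timed size, so no speed is claimed
-- outside the precondition, e.g. on SplitStrList([''], ''): A returns [], B raises ValueError; on SplitStrList(['ab'], ''): A raises ValueError, B raises ValueError
import Mathlib
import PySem

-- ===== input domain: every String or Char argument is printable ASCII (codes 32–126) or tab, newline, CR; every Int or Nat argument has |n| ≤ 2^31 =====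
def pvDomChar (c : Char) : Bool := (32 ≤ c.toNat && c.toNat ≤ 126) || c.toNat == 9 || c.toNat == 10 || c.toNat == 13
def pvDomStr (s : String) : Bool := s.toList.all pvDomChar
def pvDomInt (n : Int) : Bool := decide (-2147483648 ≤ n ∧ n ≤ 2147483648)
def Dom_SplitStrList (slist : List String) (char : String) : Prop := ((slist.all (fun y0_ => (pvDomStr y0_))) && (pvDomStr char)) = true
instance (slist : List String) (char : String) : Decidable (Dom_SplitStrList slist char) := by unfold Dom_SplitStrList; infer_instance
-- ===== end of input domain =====

-- B replaces A's repeated str.partition scans by one str.split per string plus a single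
-- interleaving pass over the pieces (equivalence of return values; neither mutates its arguments).

-- ===== PORT A =====
-- hand port of Python's thisstr.partition(char) for char ≠ "" (exact there: splits at the
-- first occurrence found by Chars.find); Python raises ValueError for char = "" — outside Pre_.
def pyPartition (s sep : List Char) : List Char × List Char × List Char :=
  if PySem.Chars.find s sep < 0 then (s, [], [])
  else (s.take (PySem.Chars.find s sep).toNat, sep,
        s.drop ((PySem.Chars.find s sep).toNat + sep.length))

-- one iteration of A's inner `for n in range(s.count(char))` body; the Bool is the `break` flag
def splitA_step (char : List Char) (st : List String × List Char × Bool) :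
    List String × List Char × Bool :=
  if st.2.2 then st
  else if st.2.1.isEmpty then (st.1, st.2.1, true)
  else
    let strs := pyPartition st.2.1 char
    let l1 := if !strs.1.isEmpty then st.1 ++ [String.ofList strs.1] else st.1
    let l2 := if !strs.2.1.isEmpty then l1 ++ [String.ofList strs.2.1] else l1
    (l2, strs.2.2, false)

def SplitStrList (slist : List String) (char : String) : List String :=
  slist.foldl (fun NewL s =>
    let r := (PySem.List.pyRange 0 ((PySem.Str.count s char : Nat) : Int)).foldl
      (fun st _ => splitA_step char.toList st) (NewL, s.toList, false)
    if !r.2.1.isEmpty then r.1 ++ [String.ofList r.2.1] else r.1) []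

-- ===== PORT B =====
def SplitStrList_alt (slist : List String) (char : String) : List String :=
  slist.foldl (fun out s =>
    match PySem.Chars.split? s.toList char.toList with
    | none => out        -- s.split("") raises ValueError in Python; outside Pre_
    | some parts =>
      (parts.foldl (fun (st : List String × Bool) p =>
          let o1 := if !st.2 then st.1 ++ [char] else st.1
          let o2 := if !p.isEmpty then o1 ++ [String.ofList p] else o1
          (o2, false)) (out, true)).1) []

-- ===== PRECONDITION & SPEC =====
-- Pre_ excludes char = "" with nonempty slist: there Python's str.split (B) raises ValueError, and
-- A's str.partition raises too except in the degenerate case where every string is empty (A then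
-- returns []); B's own algorithm raises there, so these inputs are excluded rather than matched.
def Pre_SplitStrList (slist : List String) (char : String) : Prop :=
  slist = [] ∨ char ≠ ""
instance (slist : List String) (char : String) : Decidable (Pre_SplitStrList slist char) := by
  unfold Pre_SplitStrList; infer_instance
def pvWitness_SplitStrList : List String × String := (["a,b,", "", "x"], ",")

def Spec_SplitStrList (slist : List String) (char : String) (out : List String) : Prop :=
  out = SplitStrList_alt slist char
instance (slist : List String) (char : String) (out : List String) :
    Decidable (Spec_SplitStrList slist char out) := by unfold Spec_SplitStrList; infer_instance

-- ===== CLAIM (what is proved, stated in full; the proofs are below) =====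
def Claim_equal_SplitStrList : Prop := ∀ (slist : List String) (char : String),
  Dom_SplitStrList slist char → Pre_SplitStrList slist char →
  Spec_SplitStrList slist char (SplitStrList slist char)

-- ===== LEMMAS AND PROOFS =====

-- canonical split of l on a nonempty separator (proof-side model of both programs)
def P (sep l : List Char) : List (List Char) :=
  if hs : sep = [] then [l]
  else if hi : PySem.Chars.find l sep < 0 then [l]
  else l.take (PySem.Chars.find l sep).toNat ::
       P sep (l.drop ((PySem.Chars.find l sep).toNat + sep.length))
termination_by l.length
decreasing_by
  have hinf : sep <:+: l := by
    rw [← PySem.Chars.find_nonneg_iff]; omega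
  have h1 : sep.length ≤ l.length := hinf.length_le
  have h2 : 1 ≤ sep.length := by
    cases sep with | nil => exact absurd rfl hs | cons a t => simp
  simp only [List.length_drop]; omega

def optS (p : List Char) : List String := if p.isEmpty then [] else [String.ofList p]

def emitTail (char : String) : List (List Char) → List String
  | [] => []
  | p :: r => char :: (optS p ++ emitTail char r)

def emitP (char : String) : List (List Char) → List String
  | [] => []
  | p :: r => optS p ++ emitTail char r

def consHd (x : List Char) : List (List Char) → List (List Char)
  | [] => [x]
  | p :: r => (x ++ p) :: r

lemma find_go_shift (sub : List Char) : ∀ (l : List Char) (k : Nat),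
    PySem.Chars.find.go sub l k =
      if PySem.Chars.find l sub = -1 then -1 else PySem.Chars.find l sub + k := by
  intro l
  induction l with
  | nil =>
    intro k
    simp only [PySem.Chars.find, PySem.Chars.find.go]
    split_ifs <;> simp_all
  | cons c t ih =>
    intro k
    simp only [PySem.Chars.find, PySem.Chars.find.go] at *
    by_cases hp : sub.isPrefixOf (c :: t) = true
    · simp [hp]
    · simp only [hp, if_false, Bool.false_eq_true]
      rw [ih (k+1), ih 1]
      have := PySem.Chars.neg_one_le_find t sub
      simp only [PySem.Chars.find] at this
      split_ifs <;> push_cast <;> omega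

lemma find_nil' {sub : List Char} (h : sub ≠ []) : PySem.Chars.find [] sub = -1 := by
  rw [PySem.Chars.find_eq_neg_one_iff]
  simp [List.infix_nil, h]

lemma find_cons {sub : List Char} (c : Char) (rest : List Char) :
    PySem.Chars.find (c :: rest) sub =
      if sub.isPrefixOf (c :: rest) then 0
      else if PySem.Chars.find rest sub = -1 then -1 else PySem.Chars.find rest sub + 1 := by
  conv_lhs => rw [PySem.Chars.find, PySem.Chars.find.go]
  by_cases hp : sub.isPrefixOf (c :: rest) = true
  · simp [hp]
  · simp only [hp, if_false, Bool.false_eq_true]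
    rw [find_go_shift]
    simp

lemma count_go_nil (sub : List Char) : ∀ (fuel acc : Nat),
    PySem.Chars.count.go sub fuel [] acc = acc
  | 0, _ => rfl
  | _+1, _ => rfl

lemma count_go_cons (sub : List Char) (fuel : Nat) (c : Char) (rest : List Char) (acc : Nat) :
    PySem.Chars.count.go sub (fuel+1) (c::rest) acc =
      if sub.isPrefixOf (c::rest) then
        PySem.Chars.count.go sub fuel (List.drop sub.length (c::rest)) (acc+1)
      else PySem.Chars.count.go sub fuel rest acc := rfl

lemma splitOn_go_nil (sub cur : List Char) (fuel : Nat) (acc : List (List Char)) :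
    PySem.Chars.splitOn.go sub (fuel+1) [] cur acc = (cur.reverse :: acc).reverse := rfl

lemma splitOn_go_cons (sub cur : List Char) (fuel : Nat) (c : Char) (rest : List Char)
    (acc : List (List Char)) :
    PySem.Chars.splitOn.go sub (fuel+1) (c::rest) cur acc =
      if sub.isPrefixOf (c::rest) then
        PySem.Chars.splitOn.go sub fuel (List.drop sub.length (c::rest)) [] (cur.reverse :: acc)
      else PySem.Chars.splitOn.go sub fuel rest (c::cur) acc := rfl

lemma P_nonempty (sep l : List Char) : P sep l ≠ [] := by
  rw [P]; split_ifs <;> simp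

lemma P_neg {sep l : List Char} (h : PySem.Chars.find l sep < 0) : P sep l = [l] := by
  rw [P]; split_ifs <;> simp_all

lemma P_pos {sep l : List Char} (hs : sep ≠ []) (h : ¬ PySem.Chars.find l sep < 0) :
    P sep l = l.take (PySem.Chars.find l sep).toNat ::
      P sep (l.drop ((PySem.Chars.find l sep).toNat + sep.length)) := by
  rw [P, dif_neg hs, dif_neg h]

lemma P_prefix {sub : List Char} (hs : sub ≠ []) {c : Char} {rest : List Char}
    (hp : sub.isPrefixOf (c :: rest) = true) :
    P sub (c :: rest) = [] :: P sub (List.drop sub.length (c :: rest)) := by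
  have hf : PySem.Chars.find (c :: rest) sub = 0 := by
    rw [find_cons, if_pos hp]
  rw [P_pos hs (by rw [hf]; omega), hf]
  simp

lemma P_cons {sub : List Char} (hs : sub ≠ []) {c : Char} {rest : List Char}
    (h : sub.isPrefixOf (c :: rest) = false) :
    ∃ q qs, P sub rest = q :: qs ∧ P sub (c :: rest) = (c :: q) :: qs := by
  have hf := find_cons (sub := sub) c rest
  rw [h] at hf
  simp only [Bool.false_eq_true, if_false] at hf
  by_cases h1 : PySem.Chars.find rest sub = -1
  · rw [h1, if_pos rfl] at hf
    exact ⟨rest, [], P_neg (by omega), by rw [P_neg (by omega)]⟩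
  · rw [if_neg h1] at hf
    have hge : 0 ≤ PySem.Chars.find rest sub := by
      have := PySem.Chars.neg_one_le_find rest sub; omega
    refine ⟨rest.take (PySem.Chars.find rest sub).toNat,
            P sub (rest.drop ((PySem.Chars.find rest sub).toNat + sub.length)), P_pos hs (by omega), ?_⟩
    rw [P_pos hs (by omega), hf]
    have ht : (PySem.Chars.find rest sub + 1).toNat = (PySem.Chars.find rest sub).toNat + 1 := by
      omega
    have ht2 : (PySem.Chars.find rest sub).toNat + 1 + sub.length
        = ((PySem.Chars.find rest sub).toNat + sub.length) + 1 := by omega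
    rw [ht, ht2, List.take_succ_cons, List.drop_succ_cons]

lemma sep_len_pos {sub : List Char} (hs : sub ≠ []) : 1 ≤ sub.length := by
  cases sub with | nil => exact absurd rfl hs | cons a t => simp

lemma count_go_eq {sub : List Char} (hs : sub ≠ []) : ∀ (fuel : Nat) (l : List Char) (acc : Nat),
    l.length ≤ fuel → PySem.Chars.count.go sub fuel l acc = acc + ((P sub l).length - 1) := by
  intro fuel
  induction fuel with
  | zero =>
    intro l acc hl
    have hln : l = [] := by
      cases l with | nil => rfl | cons a t => simp at hl
    subst hln
    rw [count_go_nil, P_neg (by rw [find_nil' hs]; omega)]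
    simp
  | succ fuel ih =>
    intro l acc hl
    cases l with
    | nil =>
      rw [count_go_nil, P_neg (by rw [find_nil' hs]; omega)]
      simp
    | cons c rest =>
      rw [count_go_cons]
      by_cases hp : sub.isPrefixOf (c :: rest) = true
      · rw [if_pos hp]
        have hlen := sep_len_pos hs
        have hdl : (List.drop sub.length (c :: rest)).length ≤ fuel := by
          rw [List.length_drop]; simp at hl ⊢; omega
        rw [ih _ _ hdl, P_prefix hs hp]
        have hne := P_nonempty sub (List.drop sub.length (c :: rest))
        cases hP : P sub (List.drop sub.length (c :: rest)) with
        | nil => exact absurd hP hne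
        | cons q qs => simp [hP]; omega
      · rw [if_neg hp]
        have hrl : rest.length ≤ fuel := by simp at hl; omega
        rw [ih _ _ hrl]
        obtain ⟨q, qs, h1, h2⟩ := P_cons hs (by rwa [Bool.not_eq_true] at hp)
        rw [h1, h2]
        simp

lemma count_eq_P {sub : List Char} (hs : sub ≠ []) (l : List Char) :
    PySem.Chars.count l sub = (P sub l).length - 1 := by
  rw [PySem.Chars.count]
  rw [if_neg (by simpa [List.isEmpty_iff] using hs)]
  simpa using count_go_eq hs l.length l 0 le_rfl

lemma splitOn_go_eq {sub : List Char} (hs : sub ≠ []) : ∀ (fuel : Nat) (l cur : List Char)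
    (acc : List (List Char)), l.length < fuel →
    PySem.Chars.splitOn.go sub fuel l cur acc = acc.reverse ++ consHd cur.reverse (P sub l) := by
  intro fuel
  induction fuel with
  | zero => intro l cur acc hl; omega
  | succ fuel ih =>
    intro l cur acc hl
    cases l with
    | nil =>
      rw [splitOn_go_nil, P_neg (by rw [find_nil' hs]; omega)]
      simp [consHd]
    | cons c rest =>
      rw [splitOn_go_cons]
      by_cases hp : sub.isPrefixOf (c :: rest) = true
      · rw [if_pos hp]
        have hlen := sep_len_pos hs
        have hdl : (List.drop sub.length (c :: rest)).length < fuel := by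
          rw [List.length_drop]; simp at hl ⊢; omega
        rw [ih _ _ _ hdl, P_prefix hs hp]
        have hne := P_nonempty sub (List.drop sub.length (c :: rest))
        cases hP : P sub (List.drop sub.length (c :: rest)) with
        | nil => exact absurd hP hne
        | cons q qs => simp [hP, consHd]
      · rw [if_neg hp]
        have hrl : rest.length < fuel := by simp at hl; omega
        rw [ih _ _ _ hrl]
        obtain ⟨q, qs, h1, h2⟩ := P_cons hs (by rwa [Bool.not_eq_true] at hp)
        rw [h1, h2]
        simp [consHd]

lemma splitOn_eq_P {sub : List Char} (hs : sub ≠ []) (l : List Char) :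
    PySem.Chars.splitOn l sub = P sub l := by
  rw [PySem.Chars.splitOn, splitOn_go_eq hs _ _ _ _ (by omega)]
  have hne := P_nonempty sub l
  cases hP : P sub l with
  | nil => exact absurd hP hne
  | cons q qs => simp [consHd]

lemma foldl_ignore {α β : Type} (g : α → α) (s : α) (xs : List β) :
    xs.foldl (fun st _ => g st) s = g^[xs.length] s := by
  induction xs generalizing s with
  | nil => rfl
  | cons x xs ih => simp [List.foldl_cons, ih, Function.iterate_succ_apply]

lemma iterA (char : String) (hs : char.toList ≠ []) : ∀ (t : List Char) (NewL : List String),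
    (fun r : List String × List Char × Bool =>
        if !r.2.1.isEmpty then r.1 ++ [String.ofList r.2.1] else r.1)
      ((splitA_step char.toList)^[PySem.Chars.count t char.toList] (NewL, t, false))
    = NewL ++ emitP char (P char.toList t) := by
  have key : ∀ (n : Nat) (t : List Char) (NewL : List String), t.length = n →
      (fun r : List String × List Char × Bool =>
          if !r.2.1.isEmpty then r.1 ++ [String.ofList r.2.1] else r.1)
        ((splitA_step char.toList)^[PySem.Chars.count t char.toList] (NewL, t, false))
      = NewL ++ emitP char (P char.toList t) := by
    intro n
    induction n using Nat.strong_induction_on with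
    | _ n ih =>
      intro t NewL hlen
      by_cases hneg : PySem.Chars.find t char.toList < 0
      · have hc : PySem.Chars.count t char.toList = 0 := by
          rw [count_eq_P hs, P_neg hneg]
          simp
        rw [hc, P_neg hneg, Function.iterate_zero_apply]
        simp only [emitP, emitTail, optS, List.append_nil]
        cases ht : t.isEmpty <;> simp [ht]
      · have htne : t ≠ [] := by
          intro h; subst h; rw [find_nil' hs] at hneg; omega
        have hlen1 := sep_len_pos hs
        have hinf : char.toList <:+: t := by
          rw [← PySem.Chars.find_nonneg_iff]; omega
        have hll : char.toList.length ≤ t.length := hinf.length_le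
        set i := PySem.Chars.find t char.toList with hi
        set rest := t.drop (i.toNat + char.toList.length) with hrest
        have hrl : rest.length < t.length := by
          rw [hrest, List.length_drop]
          have : 0 < t.length := by cases t with | nil => exact absurd rfl htne | cons a b => simp
          omega
        have hPt : P char.toList t = t.take i.toNat :: P char.toList rest := P_pos hs hneg
        have hcount : PySem.Chars.count t char.toList
            = PySem.Chars.count rest char.toList + 1 := by
          rw [count_eq_P hs, count_eq_P hs, hPt]
          have := P_nonempty char.toList rest
          cases hP : P char.toList rest with
          | nil => exact absurd hP this
          | cons q qs => simp [hP]
        have hstep : splitA_step char.toList (NewL, t, false)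
            = (NewL ++ optS (t.take i.toNat) ++ [char], rest, false) := by
          have hteq : t.isEmpty = false := by simpa [List.isEmpty_iff] using htne
          have hse : char.toList.isEmpty = false := by simpa [List.isEmpty_iff] using hs
          simp only [splitA_step, pyPartition, hteq, hse, ← hi, if_neg hneg, Bool.not_false,
            Bool.false_eq_true, if_true, if_false, String.ofList_toList]
          cases hte : (t.take i.toNat).isEmpty <;> simp [optS, hte, hrest]
        rw [hcount, Function.iterate_succ_apply, hstep,
            ih rest.length (by omega) rest _ rfl, hPt]
        obtain ⟨q, qs, hP⟩ : ∃ q qs, P char.toList rest = q :: qs := by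
          cases hp : P char.toList rest with
          | nil => exact absurd hp (P_nonempty _ _)
          | cons q qs => exact ⟨q, qs, rfl⟩
        rw [hP]
        simp [emitP, emitTail]
  intro t NewL
  exact key t.length t NewL rfl

lemma emitB_false (char : String) : ∀ (parts : List (List Char)) (out : List String),
    (parts.foldl (fun (st : List String × Bool) p =>
        let o1 := if !st.2 then st.1 ++ [char] else st.1
        let o2 := if !p.isEmpty then o1 ++ [String.ofList p] else o1
        (o2, false)) (out, false)).1 = out ++ emitTail char parts := by
  intro parts
  induction parts with
  | nil => intro out; simp [emitTail]
  | cons p r ih =>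
    intro out
    rw [List.foldl_cons, ih]
    simp only [emitTail, optS]
    cases hp : p.isEmpty <;> simp [hp]

lemma emitB_eq (char : String) (parts : List (List Char)) (out : List String) :
    (parts.foldl (fun (st : List String × Bool) p =>
        let o1 := if !st.2 then st.1 ++ [char] else st.1
        let o2 := if !p.isEmpty then o1 ++ [String.ofList p] else o1
        (o2, false)) (out, true)).1 = out ++ emitP char parts := by
  cases parts with
  | nil => simp [emitP]
  | cons p r =>
    rw [List.foldl_cons, emitB_false]
    simp only [emitP, optS]
    cases hp : p.isEmpty <;> simp [hp]

lemma fold_eq (char : String) (hs : char.toList ≠ []) :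
    ∀ (slist : List String) (NewL : List String),
    slist.foldl (fun NewL s =>
      let r := (PySem.List.pyRange 0 ((PySem.Str.count s char : Nat) : Int)).foldl
        (fun st _ => splitA_step char.toList st) (NewL, s.toList, false)
      if !r.2.1.isEmpty then r.1 ++ [String.ofList r.2.1] else r.1) NewL
    = slist.foldl (fun out s =>
      match PySem.Chars.split? s.toList char.toList with
      | none => out
      | some parts =>
        (parts.foldl (fun (st : List String × Bool) p =>
            let o1 := if !st.2 then st.1 ++ [char] else st.1
            let o2 := if !p.isEmpty then o1 ++ [String.ofList p] else o1
            (o2, false)) (out, true)).1) NewL := by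
  intro slist
  induction slist with
  | nil => intro NewL; rfl
  | cons s rest ih =>
    intro NewL
    rw [List.foldl_cons, List.foldl_cons, ih]
    congr 1
    have hA : (fun r : List String × List Char × Bool =>
          if !r.2.1.isEmpty then r.1 ++ [String.ofList r.2.1] else r.1)
        ((PySem.List.pyRange 0 ((PySem.Str.count s char : Nat) : Int)).foldl
          (fun st _ => splitA_step char.toList st) (NewL, s.toList, false))
        = NewL ++ emitP char (P char.toList s.toList) := by
      rw [foldl_ignore, PySem.List.pyRange_zero_natCast, List.length_map, List.length_range,
          PySem.Str.count_eq]
      exact iterA char hs s.toList NewL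
    have hsplit : PySem.Chars.split? s.toList char.toList = some (P char.toList s.toList) := by
      rw [PySem.Chars.split?, if_neg (by simpa [List.isEmpty_iff] using hs), splitOn_eq_P hs]
    have hB : (match PySem.Chars.split? s.toList char.toList with
        | none => NewL
        | some parts =>
          (parts.foldl (fun (st : List String × Bool) p =>
              let o1 := if !st.2 then st.1 ++ [char] else st.1
              let o2 := if !p.isEmpty then o1 ++ [String.ofList p] else o1
              (o2, false)) (NewL, true)).1)
        = NewL ++ emitP char (P char.toList s.toList) := by
      rw [hsplit]
      exact emitB_eq char _ NewL
    exact hA.trans hB.symm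

-- ===== VERDICT (by name: the statement is the Claim_ definition above) =====
theorem SplitStrList_spec : Claim_equal_SplitStrList := by
  intro slist char _ hpre
  unfold Spec_SplitStrList SplitStrList SplitStrList_alt
  rcases hpre with h | h
  · subst h; rfl
  · have hs : char.toList ≠ [] := by
      intro hnil
      exact h (by simpa [String.ofList_toList] using congrArg String.ofList hnil)
    exact fold_eq char hs slist []
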